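-- pv_equiv track=rewrite | github.com/Govis-Ink/Public | TheFuncEval.py | _quote_func_arguments
-- ===== SOURCE A (Python) =====
-- def _quote_func_arguments(func_str: str):
--
--     func_func_set = {'der', 'sim', 'sder', 'diff', 'difb', 'cum', 'ddif', 'dcum'}
--     valid_chars = set('abcdefghijklmnopqrstuvwxyzABCDEFGHIJKLMNOPQRSTUVWXYZ0123456789_')
--
--     outside = True
--     current = []
--     quoted = []
--     stack = []
--
--     for ch in func_str:
--         if ch in valid_chars:
--             current.append(ch)
--             quoted.append(ch)
--         else:
--             if ch == '(':
--                 current_str = ''.join(current)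
--                 if current_str in func_func_set and outside:
--                     quoted.append('("')
--                     stack.append(1)
--                     outside = False
--                 else:
--                     quoted.append('(')
--                     stack.append(0)
--             elif ch == ')':
--                 if len(stack) == 0:
--                     return True, ''
--                 last_brackets = stack.pop()
--                 if last_brackets == 1:
--                     quoted.append('")')
--                     outside = True
--                 else:
--                     quoted.append(')')
--             else:
--                 quoted.append(ch)
--             current.clear()
--
--     if len(stack) != 0:
--         return True, ''
--     else:
--         return False, ''.join(quoted)
-- ===== SOURCE B (Python) =====
-- def _quote_func_arguments(func_str: str):
--     # Recursive descent over the parenthesis tree: each call renders one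
--     # nesting level (a while loop over indices), recursing into '(' and
--     # returning at the level's ')'.  No stack of flags, no global output
--     # list: each level's rendering is composed from its children's.
--     funcs = {'der', 'sim', 'sder', 'diff', 'difb', 'cum', 'ddif', 'dcum'}
--
--     def word_char(ch):
--         return ch == '_' or 'a' <= ch <= 'z' or 'A' <= ch <= 'Z' or '0' <= ch <= '9'
--
--     def parse(i, quoting):
--         # Returns None if an unmatched '(' occurs at or below this level,
--         # else (pieces, j, closed): j = index just past this level's ')'
--         # (closed=True), or len(func_str) (closed=False).
--         out = []
--         word = []
--         while i < len(func_str):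
--             ch = func_str[i]
--             if word_char(ch):
--                 word.append(ch)
--                 out.append(ch)
--                 i += 1
--                 continue
--             if ch == '(':
--                 if (not quoting) and ''.join(word) in funcs:
--                     r = parse(i + 1, True)
--                     if r is None:
--                         return None
--                     inner, i, closed = r
--                     if not closed:
--                         return None
--                     out.append('("')
--                     out.extend(inner)
--                     out.append('")')
--                 else:
--                     r = parse(i + 1, quoting)
--                     if r is None:
--                         return None
--                     inner, i, closed = r
--                     if not closed:
--                         return None
--                     out.append('(')
--                     out.extend(inner)
--                     out.append(')')
--             elif ch == ')':
--                 return out, i + 1, True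
--             else:
--                 out.append(ch)
--                 i += 1
--             word = []
--         return out, i, False
--
--     r = parse(0, False)
--     if r is None:
--         return True, ''
--     out, _, closed = r
--     if closed:
--         return True, ''
--     return False, ''.join(out)
-- ===== Notes on version B (the rewrite author's own statement) =====
-- stated objective: alternative
-- what changed: Replaces A's single flat loop with a stack of 0/1 flags, an outside flag and one global output list by a recursive-descent parser over the parenthesis tree: each call renders one nesting level, recurses into an opening parenthesis and composes its rendering from the pieces its children return, so no explicit flag stack is maintained.
import Mathlib
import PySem

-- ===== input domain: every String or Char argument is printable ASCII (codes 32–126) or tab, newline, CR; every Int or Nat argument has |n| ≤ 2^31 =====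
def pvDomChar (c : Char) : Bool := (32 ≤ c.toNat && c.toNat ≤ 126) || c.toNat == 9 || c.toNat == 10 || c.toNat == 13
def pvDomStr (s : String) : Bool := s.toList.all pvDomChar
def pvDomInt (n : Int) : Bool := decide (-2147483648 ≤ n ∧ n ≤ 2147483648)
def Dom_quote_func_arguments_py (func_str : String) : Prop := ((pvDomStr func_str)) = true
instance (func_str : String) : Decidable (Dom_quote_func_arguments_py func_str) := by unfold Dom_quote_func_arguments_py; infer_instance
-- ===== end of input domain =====

-- B replaces A's flat loop with a 0/1-flag stack and one global output list by a
-- recursive-descent parser over the parenthesis tree that composes each level's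
-- rendering from its children's returned pieces (alternative decomposition).


-- ===== PORT A =====
def pvFuncSetA : List String := ["der", "sim", "sder", "diff", "difb", "cum", "ddif", "dcum"]
def pvValidCharsA : List Char := "abcdefghijklmnopqrstuvwxyzABCDEFGHIJKLMNOPQRSTUVWXYZ0123456789_".toList

-- A's loop with state (outside, current, quoted, stack); Python's list-end push/pop is the head here
def pvLoopA : List Char → Bool → List Char → List Char → List Nat → Bool × String
  | [], _, _, quoted, stack =>
      if stack.length ≠ 0 then (true, "") else (false, String.mk quoted)
  | ch :: rest, outside, current, quoted, stack =>
      if ch ∈ pvValidCharsA then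
        pvLoopA rest outside (current ++ [ch]) (quoted ++ [ch]) stack
      else if ch = '(' then
        if decide (String.mk current ∈ pvFuncSetA) && outside then
          pvLoopA rest false [] (quoted ++ ['(', '"']) (1 :: stack)
        else
          pvLoopA rest outside [] (quoted ++ ['(']) (0 :: stack)
      else if ch = ')' then
        match stack with
        | [] => (true, "")
        | top :: stack' =>
          if top = 1 then pvLoopA rest true [] (quoted ++ ['"', ')']) stack'
          else pvLoopA rest outside [] (quoted ++ [')']) stack'
      else
        pvLoopA rest outside [] (quoted ++ [ch]) stack

def quote_func_arguments_py (func_str : String) : Bool × String :=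
  pvLoopA func_str.toList true [] [] []

-- ===== PORT B =====
def pvFuncsB : List String := ["der", "sim", "sder", "diff", "difb", "cum", "ddif", "dcum"]

def pvIsWordChar (ch : Char) : Bool :=
  ch = '_' || ('a' ≤ ch && ch ≤ 'z') || ('A' ≤ ch && ch ≤ 'Z') || ('0' ≤ ch && ch ≤ '9')

-- Source B's `parse(i, quoting)`: one call per nesting level; the index scan becomes
-- recursion on the char-list suffix, the level's `out` list is returned as pieces.
-- `some (out, rest, closed)`: rest = chars after this level's ')' (closed = true)
-- or [] (closed = false); `none` = an unmatched '(' below.  The fuel only makes the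
-- nested recursion total; fuel = length of the whole suffix never runs out.
def pvParseB : Nat → List Char → Bool → List Char → Option (List Char × List Char × Bool)
  | _, [], _, _ => some ([], [], false)
  | 0, _ :: _, _, _ => none
  | f + 1, ch :: rest, quoting, word =>
    if pvIsWordChar ch then
      match pvParseB f rest quoting (word ++ [ch]) with
      | none => none
      | some (out, r, c) => some (ch :: out, r, c)
    else if ch = '(' then
      if !quoting && decide (String.mk word ∈ pvFuncsB) then
        match pvParseB f rest true [] with
        | none => none
        | some (inner, rest2, closed) =>
          if closed then
            match pvParseB f rest2 quoting [] with
            | none => none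
            | some (tail, rest3, c3) => some ('(' :: '"' :: (inner ++ '"' :: ')' :: tail), rest3, c3)
          else none
      else
        match pvParseB f rest quoting [] with
        | none => none
        | some (inner, rest2, closed) =>
          if closed then
            match pvParseB f rest2 quoting [] with
            | none => none
            | some (tail, rest3, c3) => some ('(' :: (inner ++ ')' :: tail), rest3, c3)
          else none
    else if ch = ')' then some ([], rest, true)
    else
      match pvParseB f rest quoting [] with
      | none => none
      | some (out, r, c) => some (ch :: out, r, c)

def quote_func_arguments_py_alt (func_str : String) : Bool × String :=
  match pvParseB func_str.toList.length func_str.toList false [] with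
  | none => (true, "")
  | some (out, _, closed) => if closed then (true, "") else (false, String.mk out)

-- ===== PRECONDITION & SPEC =====
def Spec_quote_func_arguments_py (func_str : String) (out : Bool × String) : Prop := out = quote_func_arguments_py_alt func_str
instance (func_str : String) (out : Bool × String) : Decidable (Spec_quote_func_arguments_py func_str out) := by unfold Spec_quote_func_arguments_py; infer_instance

-- ===== CLAIM (what is proved, stated in full; the proofs are below) =====
def Claim_equal_quote_func_arguments_py : Prop := ∀ (func_str : String), Dom_quote_func_arguments_py func_str → Spec_quote_func_arguments_py func_str (quote_func_arguments_py func_str)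

-- ===== LEMMAS AND PROOFS =====

theorem mem_valid (ch : Char) : ch ∈ pvValidCharsA ↔
    (97 ≤ ch.toNat ∧ ch.toNat ≤ 122) ∨ (65 ≤ ch.toNat ∧ ch.toNat ≤ 90) ∨
    (48 ≤ ch.toNat ∧ ch.toNat ≤ 57) ∨ ch.toNat = 95 := by
  have he : pvValidCharsA = ['a','b','c','d','e','f','g','h','i','j','k','l','m','n','o','p','q','r','s','t','u','v','w','x','y','z','A','B','C','D','E','F','G','H','I','J','K','L','M','N','O','P','Q','R','S','T','U','V','W','X','Y','Z','0','1','2','3','4','5','6','7','8','9','_'] := by decide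
  rw [he]
  simp only [List.mem_cons, List.not_mem_nil, or_false, Char.ext_iff]
  simp only [UInt32.ext_iff]
  simp
  omega

-- B's range test coincides with A's character-set membership test on every character
theorem wordChar_iff (ch : Char) : pvIsWordChar ch = true ↔ ch ∈ pvValidCharsA := by
  rw [mem_valid]
  simp only [pvIsWordChar, Bool.or_eq_true, Bool.and_eq_true, decide_eq_true_eq,
    Char.le_def, Char.ext_iff, UInt32.le_iff_toNat_le, UInt32.ext_iff]
  simp
  omega

-- the rest returned by a level is shorter (strictly, when it consumed its ')')
theorem parseB_rest_le : ∀ (f : Nat) (chars : List Char) (quoting : Bool)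
    (word out rest : List Char) (cl : Bool),
    pvParseB f chars quoting word = some (out, rest, cl) →
    rest.length + (if cl then 1 else 0) ≤ chars.length := by
  intro f
  induction f with
  | zero =>
    intro chars quoting word out rest cl h
    cases chars with
    | nil => simp [pvParseB] at h; obtain ⟨_, h2, h3⟩ := h; subst h2; subst h3; simp
    | cons ch rest' => simp [pvParseB] at h
  | succ g ih =>
    intro chars quoting word out rest cl h
    cases chars with
    | nil => simp [pvParseB] at h; obtain ⟨_, h2, h3⟩ := h; subst h2; subst h3; simp
    | cons ch cs =>
      simp only [pvParseB] at h
      split_ifs at h with h1 h2 h3 h4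
      · -- word char
        cases hp : pvParseB g cs quoting (word ++ [ch]) with
        | none => rw [hp] at h; simp at h
        | some v =>
          obtain ⟨o, r, c⟩ := v
          rw [hp] at h; simp at h
          obtain ⟨_, h5, h6⟩ := h; subst h5; subst h6
          have := ih cs quoting (word ++ [ch]) o r c hp
          simp; omega
      · -- quoted '('
        cases hp : pvParseB g cs true [] with
        | none => rw [hp] at h; simp at h
        | some v =>
          obtain ⟨inner, rest2, closed⟩ := v
          rw [hp] at h
          cases closed with
          | false => simp at h
          | true =>
            simp only [if_true] at h
            cases hq : pvParseB g rest2 quoting [] with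
            | none => rw [hq] at h; simp at h
            | some w =>
              obtain ⟨tail, rest3, c3⟩ := w
              rw [hq] at h; simp at h
              obtain ⟨_, h5, h6⟩ := h; subst h5; subst h6
              have t1 := ih cs true [] inner rest2 true hp
              have t2 := ih rest2 quoting [] tail rest3 c3 hq
              simp at t1 ⊢; omega
      · -- plain '('
        cases hp : pvParseB g cs quoting [] with
        | none => rw [hp] at h; simp at h
        | some v =>
          obtain ⟨inner, rest2, closed⟩ := v
          rw [hp] at h
          cases closed with
          | false => simp at h
          | true =>
            simp only [if_true] at h
            cases hq : pvParseB g rest2 quoting [] with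
            | none => rw [hq] at h; simp at h
            | some w =>
              obtain ⟨tail, rest3, c3⟩ := w
              rw [hq] at h; simp at h
              obtain ⟨_, h5, h6⟩ := h; subst h5; subst h6
              have t1 := ih cs quoting [] inner rest2 true hp
              have t2 := ih rest2 quoting [] tail rest3 c3 hq
              simp at t1 ⊢; omega
      · -- ')'
        simp at h
        obtain ⟨_, h5, h6⟩ := h; subst h5; subst h6
        simp
      · -- other char
        cases hp : pvParseB g cs quoting [] with
        | none => rw [hp] at h; simp at h
        | some v =>
          obtain ⟨o, r, c⟩ := v
          rw [hp] at h; simp at h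
          obtain ⟨_, h5, h6⟩ := h; subst h5; subst h6
          have := ih cs quoting [] o r c hp
          simp; omega

-- A's loop from any state equals one level of B's parser plus A's own continuation on the stack
theorem loopA_eq_parse : ∀ (n : Nat) (chars : List Char), chars.length ≤ n →
    ∀ (outside : Bool) (word quoted : List Char) (stack : List Nat) (f : Nat), chars.length ≤ f →
    pvLoopA chars outside word quoted stack =
      match pvParseB f chars (!outside) word with
      | none => (true, "")
      | some (out, _, false) =>
          if stack.length ≠ 0 then (true, "") else (false, String.mk (quoted ++ out))
      | some (out, rest, true) =>
          match stack with
          | [] => (true, "")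
          | top :: stack' =>
            if top = 1 then pvLoopA rest true [] (quoted ++ out ++ ['"', ')']) stack'
            else pvLoopA rest outside [] (quoted ++ out ++ [')']) stack' := by
  intro n
  induction n with
  | zero =>
    intro chars hlen outside word quoted stack f hf
    have hc : chars = [] := List.eq_nil_of_length_eq_zero (Nat.le_zero.mp hlen)
    subst hc
    simp [pvLoopA, pvParseB]
  | succ n ih =>
    intro chars hlen outside word quoted stack f hf
    cases chars with
    | nil => simp [pvLoopA, pvParseB]
    | cons ch cs =>
      cases f with
      | zero => simp at hf
      | succ g =>
        have hlen' : cs.length ≤ n := by simpa using hlen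
        have hf' : cs.length ≤ g := by simpa using hf
        simp only [pvLoopA, pvParseB]
        by_cases hw : pvIsWordChar ch = true
        · rw [if_pos ((wordChar_iff ch).mp hw), if_pos hw,
            ih cs hlen' outside (word ++ [ch]) (quoted ++ [ch]) stack g hf']
          cases hp : pvParseB g cs (!outside) (word ++ [ch]) with
          | none => simp
          | some v =>
            obtain ⟨o, r, c⟩ := v
            cases c
            · simp
            · cases stack with
              | nil => simp
              | cons top stack' =>
                by_cases ht : top = 1 <;> simp [ht, List.append_assoc]
        · rw [if_neg (fun hm => hw ((wordChar_iff ch).mpr hm)), if_neg hw]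
          by_cases hop : ch = '('
          · rw [if_pos hop, if_pos hop]
            have hcond : (!(!outside) && decide (String.mk word ∈ pvFuncsB)) =
                (decide (String.mk word ∈ pvFuncSetA) && outside) := by
              simp only [pvFuncsB, pvFuncSetA, Bool.not_not]
              exact Bool.and_comm _ _
            rw [hcond]
            by_cases hc : (decide (String.mk word ∈ pvFuncSetA) && outside) = true
            · -- quoted '(' : here outside = true
              have houts : outside = true := (Bool.and_eq_true_iff.mp hc).2
              subst houts
              rw [if_pos hc, if_pos hc,
                ih cs hlen' false [] (quoted ++ ['(', '"']) (1 :: stack) g hf']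
              simp only [Bool.not_false]
              cases hp : pvParseB g cs true [] with
              | none => simp
              | some v =>
                obtain ⟨inner, rest2, closed⟩ := v
                cases closed with
                | false => simp
                | true =>
                  have hr2 : rest2.length ≤ n := by
                    have := parseB_rest_le g cs true [] inner rest2 true (by simpa using hp)
                    simp at this; omega
                  have hr2f : rest2.length ≤ g := by
                    have := parseB_rest_le g cs true [] inner rest2 true (by simpa using hp)
                    simp at this; omega
                  simp only [if_true]
                  rw [ih rest2 hr2 true [] (quoted ++ ['(', '"'] ++ inner ++ ['"', ')']) stack g hr2f]
                  simp only [Bool.not_true]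
                  cases hq : pvParseB g rest2 false [] with
                  | none => simp
                  | some w =>
                    obtain ⟨tail, rest3, c3⟩ := w
                    cases c3
                    · simp [List.append_assoc]
                    · cases stack with
                      | nil => simp
                      | cons top stack' =>
                        by_cases ht : top = 1 <;> simp [ht, List.append_assoc]
            · -- plain '('
              rw [if_neg hc, if_neg hc,
                ih cs hlen' outside [] (quoted ++ ['(']) (0 :: stack) g hf']
              cases hp : pvParseB g cs (!outside) [] with
              | none => simp
              | some v =>
                obtain ⟨inner, rest2, closed⟩ := v
                cases closed with
                | false => simp
                | true =>
                  have hle := parseB_rest_le g cs (!outside) [] inner rest2 true hp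
                  have hr2 : rest2.length ≤ n := by simp at hle; omega
                  have hr2f : rest2.length ≤ g := by simp at hle; omega
                  simp only [if_true]
                  rw [if_neg (by decide : ¬ ((0 : Nat) = 1)),
                    ih rest2 hr2 outside [] (quoted ++ ['('] ++ inner ++ [')']) stack g hr2f]
                  cases hq : pvParseB g rest2 (!outside) [] with
                  | none => simp
                  | some w =>
                    obtain ⟨tail, rest3, c3⟩ := w
                    cases c3
                    · simp [List.append_assoc]
                    · cases stack with
                      | nil => simp
                      | cons top stack' =>
                        by_cases ht : top = 1 <;> simp [ht, List.append_assoc]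
          · rw [if_neg hop, if_neg hop]
            by_cases hcl : ch = ')'
            · rw [if_pos hcl, if_pos hcl]
              cases stack with
              | nil => simp
              | cons top stack' =>
                by_cases ht : top = 1 <;> simp [ht]
            · rw [if_neg hcl, if_neg hcl,
                ih cs hlen' outside [] (quoted ++ [ch]) stack g hf']
              cases hp : pvParseB g cs (!outside) [] with
              | none => simp
              | some v =>
                obtain ⟨o, r, c⟩ := v
                cases c
                · simp
                · cases stack with
                  | nil => simp
                  | cons top stack' =>
                    by_cases ht : top = 1 <;> simp [ht, List.append_assoc]

-- ===== VERDICT (by name: the statement is the Claim_ definition above) =====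
theorem quote_func_arguments_py_spec : Claim_equal_quote_func_arguments_py := by
  intro func_str _
  unfold Spec_quote_func_arguments_py quote_func_arguments_py quote_func_arguments_py_alt
  have h := loopA_eq_parse func_str.toList.length func_str.toList le_rfl true [] [] []
      func_str.toList.length le_rfl
  simp only [Bool.not_true] at h
  rw [h]
  cases hp : pvParseB func_str.toList.length func_str.toList false [] with
  | none => simp
  | some v =>
    obtain ⟨out, rest, cl⟩ := v
    cases cl <;> simp
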